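-- pv_equiv track=rewrite | github.com/ej970624/Coding_Test_Study | 프로그래머스/스택큐_다리를 지나는 트럭.py | solution
-- ===== SOURCE A (Python) =====
-- def solution(bridge_length, weight, truck_weights):
--     answer = 1
--     start = [1] #트럭 다리 들어갈 때의 시간
--     que = [truck_weights.pop(0)] #다리 위의 트럭 리스트
--     now_weight = que[0] #현재 다리 위에 있는 트럭들의 무게 합
--
--     while len(truck_weights) > 0:
--         answer += 1
--         if start[0] + bridge_length == answer: #다리 위의 첫 트럭이 도착지에 도착하면
--             now_weight -= que.pop(0)
--             start.pop(0)
--         if now_weight + truck_weights[0] <= weight: #다음 트럭이 들어갈 수 있다면 (무게비교)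
--             now_weight += truck_weights[0]
--             que.append(truck_weights.pop(0))
--             start.append(answer)
--         else: #들어갈 수 없다면 다리 위의 첫 트럭이 도착하기 전으로 이동
--             answer = start[0] + bridge_length - 1
--
--     return start[-1] + bridge_length
-- ===== SOURCE B (Python) =====
-- def solution(bridge_length, weight, truck_weights):
--     # Event-driven two-pointer over entry times: the window holds the trucks now
--     # on the bridge as (entry_time, weight) pairs; the first truck drives on at
--     # t = 1, each later truck enters once it fits.  Return-value equivalence only
--     # (A empties truck_weights in place, B does not mutate it).
--     t = 1
--     load = truck_weights[0]
--     window = [(1, load)]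
--     for wt in truck_weights[1:]:
--         t += 1
--         while window and window[0][0] + bridge_length <= t:
--             load -= window.pop(0)[1]
--         while load + wt > weight:
--             e, v = window.pop(0)
--             t = e + bridge_length
--             load -= v
--         window.append((t, wt))
--         load += wt
--     return t + bridge_length
-- ===== Notes on version B (the rewrite author's own statement) =====
-- stated objective: alternative
-- what changed: B replaces A's parallel start/que lists, per-tick counter and backwards time-jump trick with a single window of (entry_time, weight) pairs advanced event-to-event: each truck's entry time is computed by dropping the truck due to leave and then popping window fronts while the next truck does not fit (entering immediately when the bridge is empty, as A's unconditional first load does).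
-- outside the precondition, e.g. on solution(0, 3, [2, 1, 2]): A returns 1, B returns 3; on solution(126, -2, [-1, -1, 0]): A returns 129, B returns 129
import Mathlib
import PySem

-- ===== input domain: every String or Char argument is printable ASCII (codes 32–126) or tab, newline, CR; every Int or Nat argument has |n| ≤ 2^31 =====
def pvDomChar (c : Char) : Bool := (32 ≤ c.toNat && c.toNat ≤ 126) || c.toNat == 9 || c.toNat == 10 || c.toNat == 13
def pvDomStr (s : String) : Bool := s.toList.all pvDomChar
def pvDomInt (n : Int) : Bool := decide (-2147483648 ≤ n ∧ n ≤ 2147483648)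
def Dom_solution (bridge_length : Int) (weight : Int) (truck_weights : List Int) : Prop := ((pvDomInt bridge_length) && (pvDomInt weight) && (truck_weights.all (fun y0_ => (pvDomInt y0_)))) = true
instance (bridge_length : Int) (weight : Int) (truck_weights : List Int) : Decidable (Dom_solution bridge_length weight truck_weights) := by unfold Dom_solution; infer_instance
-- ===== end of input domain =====

-- B replaces A's parallel start/que lists and backwards time-jump trick with a single
-- window of (entry_time, weight) pairs advanced event-to-event (the first truck drives
-- on at t = 1, each later truck enters once it fits); return-value equivalence only
-- (A empties truck_weights in place, B does not mutate it).

-- ===== PORT A =====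
-- A's while loop, one iteration per recursive call; fuel is a totality guard only
-- (the equivalence proof shows 3*n+2 iterations always suffice on Pre_ inputs).
def aLoop (bridge_length weight : Int) (fuel : Nat) (answer : Int)
    (start que : List Int) (now_weight : Int) (tw : List Int) : Int :=
  match tw with
  | [] => start.getLast?.getD 0 + bridge_length     -- return start[-1] + bridge_length
  | t0 :: rest =>
    match fuel with
    | 0 => 0
    | fuel + 1 =>
      let a := answer + 1
      -- if start[0] + bridge_length == answer: now_weight -= que.pop(0); start.pop(0)
      let s := if start.headD 0 + bridge_length = a then
                 (start.tail, que.tail, now_weight - que.headD 0)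
               else (start, que, now_weight)
      if s.2.2 + t0 ≤ weight then
        aLoop bridge_length weight fuel a (s.1 ++ [a]) (s.2.1 ++ [t0]) (s.2.2 + t0) rest
      else
        aLoop bridge_length weight fuel (s.1.headD 0 + bridge_length - 1) s.1 s.2.1 s.2.2 (t0 :: rest)

def solution (bridge_length : Int) (weight : Int) (truck_weights : List Int) : Int :=
  match truck_weights with
  | [] => 0      -- Python raises IndexError (pop from the empty list); excluded by Pre_
  | t :: rest => aLoop bridge_length weight (3 * rest.length + 2) 1 [1] [t] t rest

-- ===== PORT B =====
-- while window and window[0][0] + bridge_length <= t: load -= window.pop(0)[1]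
def dropArrived (bridge_length : Int) (window : List (Int × Int)) (load t : Int) :
    List (Int × Int) × Int :=
  match window with
  | [] => ([], load)
  | (e, v) :: rest =>
    if e + bridge_length ≤ t then dropArrived bridge_length rest (load - v) t
    else ((e, v) :: rest, load)

-- while load + wt > weight: e, v = window.pop(0); t = e + bridge_length; load -= v
def waitFit (bridge_length weight : Int) (window : List (Int × Int)) (load t wt : Int) :
    List (Int × Int) × Int × Int :=
  if load + wt ≤ weight then (window, load, t)
  else
    match window with
    | [] => ([], load, t)       -- Python raises IndexError here; excluded by Pre_
    | (e, v) :: rest => waitFit bridge_length weight rest (load - v) (e + bridge_length) wt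

def bLoop (bridge_length weight : Int) (window : List (Int × Int)) (load t : Int)
    (tw : List Int) : Int :=
  match tw with
  | [] => t + bridge_length
  | wt :: rest =>
    let d := dropArrived bridge_length window load (t + 1)
    let r := waitFit bridge_length weight d.1 d.2 (t + 1) wt
    bLoop bridge_length weight (r.1 ++ [(r.2.2, wt)]) (r.2.1 + wt) r.2.2 rest

def solution_alt (bridge_length : Int) (weight : Int) (truck_weights : List Int) : Int :=
  match truck_weights with
  | [] => 0    -- Python raises IndexError (truck_weights[0]); excluded by Pre_
  | t :: rest => bLoop bridge_length weight [(1, t)] t 1 rest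

-- ===== PRECONDITION & SPEC =====
-- Pre_ is the problem's natural domain (the first truck enters the bridge
-- unconditionally, like in A; every later truck within the weight limit; 1 ≤
-- bridge_length — or, for bridge_length ≤ 0, a single truck or a list whose every
-- prefix load fits, where no waiting can occur).  It excludes: the empty list, where A
-- raises IndexError; later trucks above the limit, where A may raise (IndexError once
-- the bridge empties) or return, depending on the whole simulation — not a closed-form
-- condition; and bridge_length ≤ 0 with a prefix overload, where A's backwards
-- time-jump returns accidental values that B's window algorithm does not reproduce.
def Pre_solution (bridge_length : Int) (weight : Int) (truck_weights : List Int) : Prop :=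
  truck_weights ≠ [] ∧ (∀ t ∈ truck_weights.tail, t ≤ weight) ∧
    (1 ≤ bridge_length ∨ truck_weights.length = 1 ∨
      ∀ k ∈ List.range truck_weights.length, (truck_weights.take (k + 2)).sum ≤ weight)
instance (bridge_length : Int) (weight : Int) (truck_weights : List Int) : Decidable (Pre_solution bridge_length weight truck_weights) := by unfold Pre_solution; infer_instance

def pvWitness_solution : Int × Int × List Int := (2, 10, [7, 4, 5, 6])

def Spec_solution (bridge_length : Int) (weight : Int) (truck_weights : List Int) (out : Int) : Prop := out = solution_alt bridge_length weight truck_weights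
instance (bridge_length : Int) (weight : Int) (truck_weights : List Int) (out : Int) : Decidable (Spec_solution bridge_length weight truck_weights out) := by unfold Spec_solution; infer_instance

-- ===== CLAIM (what is proved, stated in full; the proofs are below) =====
def Claim_equal_solution : Prop := ∀ (bridge_length : Int) (weight : Int) (truck_weights : List Int), Dom_solution bridge_length weight truck_weights → Pre_solution bridge_length weight truck_weights → Spec_solution bridge_length weight truck_weights (solution bridge_length weight truck_weights)

-- ===== LEMMAS AND PROOFS =====

-- The aligned loop-head simulation statement, parameterised by A's remaining fuel
-- (used as the strong-induction hypothesis threaded into fit_sim).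
def HeadStmt (fuel : Nat) : Prop :=
  ∀ (bl w : Int), 1 ≤ bl →
  ∀ (a : Int) (window : List (Int × Int)) (tw : List Int),
    (∀ x ∈ tw, x ≤ w) →
    window ≠ [] →
    List.Pairwise (· < ·) (window.map Prod.fst) →
    (window.map Prod.fst).getLast? = some a →
    (∀ p ∈ window, p.1 ≤ a) →
    (∀ p ∈ window, a < p.1 + bl) →
    3 * tw.length + 2 * window.length ≤ fuel →
    aLoop bl w fuel a (window.map Prod.fst) (window.map Prod.snd)
        ((window.map Prod.snd).sum) tw
      = bLoop bl w window ((window.map Prod.snd).sum) a tw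

theorem fit_sim (bl w : Int) (hbl : 1 ≤ bl) :
    ∀ (w1 : List (Int × Int)) (f : Nat),
    (∀ g, g ≤ f → HeadStmt g) →
    ∀ (a t0 : Int) (rest : List Int),
    (∀ x ∈ rest, x ≤ w) → t0 ≤ w →
    List.Pairwise (· < ·) (w1.map Prod.fst) →
    (∀ p ∈ w1, p.1 < a) →
    (∀ p ∈ w1, a < p.1 + bl) →
    3 * rest.length + 2 * w1.length + 2 ≤ f →
    (if ((w1.map Prod.snd).sum) + t0 ≤ w then
        aLoop bl w f a (w1.map Prod.fst ++ [a]) (w1.map Prod.snd ++ [t0])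
          ((w1.map Prod.snd).sum + t0) rest
      else
        aLoop bl w f ((w1.map Prod.fst).headD 0 + bl - 1) (w1.map Prod.fst)
          (w1.map Prod.snd) ((w1.map Prod.snd).sum) (t0 :: rest))
    = bLoop bl w ((waitFit bl w w1 ((w1.map Prod.snd).sum) a t0).1 ++
          [((waitFit bl w w1 ((w1.map Prod.snd).sum) a t0).2.2, t0)])
        ((waitFit bl w w1 ((w1.map Prod.snd).sum) a t0).2.1 + t0)
        ((waitFit bl w w1 ((w1.map Prod.snd).sum) a t0).2.2) rest := by
  intro w1
  induction w1 with
  | nil =>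
    intro f hIH a t0 rest hres ht0 hpw hlt hgt hf
    have hfit : (0 : Int) + t0 ≤ w := by omega
    simp only [List.map_nil, List.sum_nil, waitFit, if_pos hfit]
    have := hIH f le_rfl bl w hbl a [(a, t0)] rest hres (by simp)
      (by simp) (by simp) (by simp) (by simp; omega) (by simp at hf ⊢; omega)
    simpa using this
  | cons hd tl ih =>
    obtain ⟨e1, v1⟩ := hd
    intro f hIH a t0 rest hres ht0 hpw hlt hgt hf
    by_cases hfit : (((e1, v1) :: tl).map Prod.snd).sum + t0 ≤ w
    · rw [if_pos hfit]
      rw [show waitFit bl w ((e1,v1)::tl) ((((e1,v1)::tl).map Prod.snd).sum) a t0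
           = (((e1,v1)::tl), (((e1,v1)::tl).map Prod.snd).sum, a) from by
         rw [waitFit, if_pos hfit]]
      have := hIH f le_rfl bl w hbl a (((e1,v1)::tl) ++ [(a, t0)]) rest hres (by simp)
        (by rw [List.map_append, List.pairwise_append]
            refine ⟨hpw, by simp, ?_⟩
            intro x hx y hy
            simp only [List.map_cons, List.map_nil, List.mem_singleton] at hy
            subst hy
            rcases List.mem_map.mp hx with ⟨p, hp, rfl⟩
            exact hlt _ hp)
        (by simp only [List.map_append, List.map_cons, List.map_nil]
            rw [List.getLast?_concat])
        (by intro p hp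
            rcases List.mem_append.mp hp with h | h
            · exact le_of_lt (hlt _ h)
            · simp at h; simp [h])
        (by intro p hp
            rcases List.mem_append.mp hp with h | h
            · exact hgt _ h
            · simp at h; subst h; simp; omega)
        (by simp at hf ⊢; omega)
      simp only [List.map_cons, List.sum_cons, List.map_append, List.sum_append,
        List.map_nil, List.sum_nil, List.cons_append] at this ⊢
      ring_nf at this ⊢
      exact this
    · rw [if_neg hfit]
      have hsum : (((e1,v1)::tl).map Prod.snd).sum - v1 = (tl.map Prod.snd).sum := by
        simp [List.sum_cons]
      have hwf : waitFit bl w ((e1,v1)::tl) ((((e1,v1)::tl).map Prod.snd).sum) a t0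
          = waitFit bl w tl ((tl.map Prod.snd).sum) (e1 + bl) t0 := by
        rw [waitFit, if_neg hfit, hsum]
      rw [hwf]
      -- unfold one A iteration: the front truck (e1,v1) leaves, then the fit re-check
      obtain ⟨f', rfl⟩ : ∃ f', f = f' + 1 := ⟨f - 1, by simp at hf ⊢; omega⟩
      have ha : a < e1 + bl := hgt (e1,v1) (by simp)
      have hpwtl : ∀ p ∈ tl, e1 < p.1 := by
        intro p hp
        exact (List.pairwise_cons.mp hpw).1 p.1 (List.mem_map_of_mem hp)
      have step := ih f' (fun g hg => hIH g (by omega)) (e1 + bl) t0 rest hres ht0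
        (List.pairwise_cons.mp hpw).2
        (fun p hp => lt_trans (hlt p (by simp [hp])) ha)
        (fun p hp => by have := hpwtl p hp; omega)
        (by simp at hf ⊢; omega)
      rw [aLoop]
      simp only [List.map_cons, List.headD_cons, List.sum_cons]
      rw [if_pos (by ring : e1 + bl = e1 + bl - 1 + 1)]
      simp only [List.tail_cons]
      rw [show e1 + bl - 1 + 1 = e1 + bl from by ring]
      rw [show v1 + (tl.map Prod.snd).sum - v1 = (tl.map Prod.snd).sum from by ring]
      exact step

theorem head_sim : ∀ fuel, HeadStmt fuel := by
  intro fuel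
  induction fuel using Nat.strong_induction_on with
  | _ fuel IH =>
  intro bl w hbl a window tw htw hne hpw hlast hle hgt hf
  match tw with
  | [] =>
    rw [aLoop, bLoop, hlast]
    rfl
  | t0 :: rest =>
    obtain ⟨⟨e1, v1⟩, wtl, rfl⟩ : ∃ hd tl, window = hd :: tl := by
      cases window with
      | nil => exact absurd rfl hne
      | cons hd tl => exact ⟨hd, tl, rfl⟩
    obtain ⟨f, rfl⟩ : ∃ f, fuel = f + 1 := ⟨fuel - 1, by simp at hf ⊢; omega⟩
    have ht0 : t0 ≤ w := htw t0 (by simp)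
    have hres : ∀ x ∈ rest, x ≤ w := fun x hx => htw x (by simp [hx])
    have ha1 : a < e1 + bl := hgt (e1,v1) (by simp)
    have hpwtl : ∀ p ∈ wtl, e1 < p.1 := fun p hp =>
      (List.pairwise_cons.mp hpw).1 p.1 (List.mem_map_of_mem hp)
    rw [aLoop, bLoop]
    simp only [List.map_cons, List.headD_cons, List.sum_cons]
    by_cases hc : e1 + bl = a + 1
    · rw [if_pos hc]
      simp only [List.tail_cons]
      -- dropArrived removes exactly the front truck
      have hdrop : dropArrived bl ((e1,v1)::wtl) (v1 + (wtl.map Prod.snd).sum) (a+1)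
          = (wtl, (wtl.map Prod.snd).sum) := by
        rw [dropArrived, if_pos (le_of_eq hc)]
        rw [show v1 + (wtl.map Prod.snd).sum - v1 = (wtl.map Prod.snd).sum from by ring]
        cases wtl with
        | nil => rw [dropArrived]
        | cons hd2 tl2 =>
          obtain ⟨e2, v2⟩ := hd2
          have h2 : e1 < e2 := hpwtl (e2,v2) (by simp)
          rw [dropArrived, if_neg (by omega)]
      rw [hdrop]
      rw [show v1 + (wtl.map Prod.snd).sum - v1 = (wtl.map Prod.snd).sum from by ring]
      have step := fit_sim bl w hbl wtl f (fun g hg => IH g (by omega)) (a+1) t0 rest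
        hres ht0 (List.pairwise_cons.mp hpw).2
        (fun p hp => lt_of_le_of_lt (hle p (by simp [hp])) (by omega))
        (fun p hp => by have := hpwtl p hp; omega)
        (by simp at hf ⊢; omega)
      exact step
    · rw [if_neg hc]
      have hdrop : dropArrived bl ((e1,v1)::wtl) (v1 + (wtl.map Prod.snd).sum) (a+1)
          = ((e1,v1)::wtl, v1 + (wtl.map Prod.snd).sum) := by
        rw [dropArrived, if_neg (by omega)]
      rw [hdrop]
      have step := fit_sim bl w hbl ((e1,v1)::wtl) f (fun g hg => IH g (by omega)) (a+1)
        t0 rest hres ht0 hpw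
        (fun p hp => lt_of_le_of_lt (hle p hp) (by omega))
        (fun p hp => by
          rcases List.mem_cons.mp hp with h | h
          · subst h; simp; omega
          · have := hpwtl p h; have := hgt p hp; omega)
        (by simp at hf ⊢; omega)
      simp only [List.map_cons, List.sum_cons] at step
      exact step

-- dropArrived pops the whole window once every entry is due to leave
theorem dropArrived_all (bl : Int) :
    ∀ (window : List (Int × Int)) (load t : Int),
    (∀ p ∈ window, p.1 + bl ≤ t) →
    dropArrived bl window load t = ([], load - (window.map Prod.snd).sum) := by
  intro window
  induction window with
  | nil => intro load t _; simp [dropArrived]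
  | cons hd tl ih =>
    obtain ⟨e, v⟩ := hd
    intro load t hall
    rw [dropArrived, if_pos (hall (e, v) (by simp))]
    rw [ih (load - v) t (fun p hp => hall p (by simp [hp]))]
    simp only [List.map_cons, List.sum_cons]
    congr 1
    ring

-- with bridge_length ≤ 0 every truck on the bridge leaves before the next tick,
-- so B enters one truck per tick and finishes at t + tw.length + bridge_length
theorem bLoop_all_leave (bl w : Int) (hbl : bl ≤ 0) :
    ∀ (tw : List Int) (window : List (Int × Int)) (load t : Int),
    (∀ p ∈ window, p.1 ≤ t) →
    bLoop bl w window load t tw = t + tw.length + bl := by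
  intro tw
  induction tw with
  | nil => intro window load t _; rw [bLoop]; simp
  | cons wt rest ih =>
    intro window load t hwin
    rw [bLoop]
    rw [dropArrived_all bl window load (t + 1) (fun p hp => by have := hwin p hp; omega)]
    rw [show ∀ l u, waitFit bl w ([] : List (Int × Int)) l (t + 1) u = ([], l, t + 1) from by
      intro l u; rw [waitFit]; split <;> rfl]
    simp only [List.nil_append]
    rw [ih [(t + 1, wt)] _ (t + 1) (by simp)]
    push_cast [List.length_cons]
    ring

-- with bridge_length ≤ 0 A's arrival test never fires (the front entered at time 1),
-- and with every prefix load fitting A enters one truck per iteration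
theorem aLoop_no_arrival (bl w : Int) (hbl : bl ≤ 0) :
    ∀ (tw : List Int) (fuel : Nat) (a : Int) (start que : List Int) (nw : Int),
    1 ≤ a → start ≠ [] → start.headD 0 = 1 → start.getLast?.getD 0 = a →
    (∀ k ∈ List.range tw.length, nw + (tw.take (k + 1)).sum ≤ w) →
    tw.length ≤ fuel →
    aLoop bl w fuel a start que nw tw = a + tw.length + bl := by
  intro tw
  induction tw with
  | nil => intro fuel a start que nw _ _ _ hlast _ _; rw [aLoop, hlast]; simp
  | cons t0 rest ih =>
    intro fuel a start que nw ha hne hhead hlast hpfx hfuel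
    obtain ⟨f, rfl⟩ : ∃ f, fuel = f + 1 := ⟨fuel - 1, by simp at hfuel; omega⟩
    rw [aLoop, hhead]
    rw [if_neg (by omega : ¬(1 + bl = a + 1))]
    have hfit : nw + t0 ≤ w := by
      have := hpfx 0 (by simp)
      simpa using this
    rw [if_pos hfit]
    obtain ⟨s0, srest, rfl⟩ : ∃ s0 srest, start = s0 :: srest := by
      cases start with
      | nil => exact absurd rfl hne
      | cons s0 srest => exact ⟨s0, srest, rfl⟩
    rw [ih f (a + 1) ((s0 :: srest) ++ [a + 1]) (que ++ [t0]) (nw + t0)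
          (by omega) (by simp) (by simpa using hhead)
          (by rw [List.getLast?_concat]; simp)
          (by intro k hk
              have := hpfx (k + 1) (by simp at hk ⊢; omega)
              simp only [List.take_succ_cons, List.sum_cons] at this
              omega)
          (by simp at hfuel ⊢; omega)]
    push_cast [List.length_cons]
    ring

-- the 1 ≤ bridge_length case of the verdict, shared by two branches of the final proof
theorem solution_spec_main (bl w : Int) (hbl : 1 ≤ bl) (t : Int) (rest : List Int)
    (hall : ∀ x ∈ rest, x ≤ w) :
    solution bl w (t :: rest) = solution_alt bl w (t :: rest) := by
  rw [solution, solution_alt]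
  have step := head_sim (3 * rest.length + 2) bl w hbl 1 [(1, t)] rest
    hall (by simp) (by simp) (by simp)
    (by simp) (by simp; omega) (by simp)
  simp only [List.map_cons, List.map_nil, List.sum_cons, List.sum_nil] at step
  rw [show t + 0 = t from by ring] at step
  exact step

-- ===== VERDICT (by name: the statement is the Claim_ definition above) =====
theorem solution_spec : Claim_equal_solution := by
  intro bl w tw _ hpre
  obtain ⟨hne, hall, hbl1⟩ := hpre
  rcases hbl1 with hbl | hlen | hpfx
  case inr.inl =>
    -- a single truck: both programs return 1 + bridge_length for every bridge_length
    match tw, hlen with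
    | [t], _ =>
      show solution bl w [t] = solution_alt bl w [t]
      rw [solution, solution_alt, aLoop, bLoop]
      norm_num
  case inr.inr =>
    -- bridge_length may be ≤ 0 here, but every prefix fits: no truck ever waits,
    -- both programs return tw.length + bridge_length (+1-based entry times cancel)
    match tw, hne with
    | t :: rest, _ =>
      show solution bl w (t :: rest) = solution_alt bl w (t :: rest)
      by_cases hbl : 1 ≤ bl
      · exact solution_spec_main bl w hbl t rest (fun x hx => hall x (by simpa using hx))
      · rw [solution, solution_alt]
        rw [aLoop_no_arrival bl w (by omega) rest (3 * rest.length + 2) 1 [1] [t] t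
              (by omega) (by simp) (by simp) (by simp)
              (by intro k hk
                  have := hpfx k (by simp at hk ⊢; omega)
                  simpa using this)
              (by omega)]
        rw [bLoop_all_leave bl w (by omega) rest [(1, t)] t 1 (by simp)]
  case inl =>
  match tw with
  | [] => exact absurd rfl hne
  | t :: rest =>
    exact solution_spec_main bl w hbl t rest (fun x hx => hall x (by simpa using hx))
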